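-- pv_equiv track=rewrite | github.com/cirosantilli/project-euler-solvers | solvers/380.py | _laplacian_minor
-- ===== SOURCE A (Python) =====
-- def _laplacian_minor(m: int, n: int, drop: int = 0):
--     """Return the (mn-1)x(mn-1) Laplacian minor of the m×n grid graph with vertex `drop` removed."""
--     N = m * n
--     if N <= 1:
--         return []
--
--     size = N - 1
--     A = [[0] * size for _ in range(size)]
--
--     def idx(u: int) -> int:
--         # Map original vertex index to minor index (skip `drop`)
--         return u - 1 if u > drop else u
--
--     def add_edge(u: int, v: int):
--         # Add an undirected edge u—v into the Laplacian minor.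
--         # If one endpoint is dropped, only the remaining endpoint's degree increases.
--         if u == drop and v == drop:
--             return
--         if u == drop:
--             vv = idx(v)
--             A[vv][vv] += 1
--             return
--         if v == drop:
--             uu = idx(u)
--             A[uu][uu] += 1
--             return
--
--         uu = idx(u)
--         vv = idx(v)
--         A[uu][uu] += 1
--         A[vv][vv] += 1
--         A[uu][vv] -= 1
--         A[vv][uu] -= 1
--
--     for r in range(m):
--         for c in range(n):
--             u = r * n + c
--             if r + 1 < m:
--                 add_edge(u, (r + 1) * n + c)
--             if c + 1 < n:
--                 add_edge(u, r * n + (c + 1))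
--
--     return A
-- ===== SOURCE B (Python) =====
-- def _laplacian_minor(m: int, n: int, drop: int = 0):
--     """Return the (mn-1)x(mn-1) Laplacian minor of the m×n grid graph with vertex `drop` removed."""
--     N = m * n
--     if N <= 1:
--         return []
--     size = N - 1
--
--     def orig(i: int) -> int:
--         # Map minor index back to the original vertex index (skip `drop`)
--         return i if i < drop else i + 1
--
--     def coords(u: int):
--         return divmod(u, n)
--
--     def degree(r: int, c: int) -> int:
--         # Full grid degree of vertex (r, c): in-bounds up/down/left/right neighbours
--         return (r > 0) + (r + 1 < m) + (c > 0) + (c + 1 < n)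
--
--     out = []
--     for i in range(size):
--         ri, ci = coords(orig(i))
--         row = []
--         for j in range(size):
--             rj, cj = coords(orig(j))
--             if i == j:
--                 row.append(degree(ri, ci))
--             elif abs(ri - rj) + abs(ci - cj) == 1:
--                 row.append(-1)
--             else:
--                 row.append(0)
--         out.append(row)
--     return out
-- ===== Notes on version B (the rewrite author's own statement) =====
-- stated objective: alternative
-- what changed: Instead of allocating a zero matrix and accumulating +1/-1 updates edge by edge over the grid's edge list, B computes every minor entry directly in closed form: the diagonal is the full grid degree read off the vertex's (row,col) coordinates and an off-diagonal entry is -1 exactly when the two vertices are grid-adjacent (|dr|+|dc|=1), else 0.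
-- outside the precondition, e.g. on _laplacian_minor(2, 1, -1): A returns [[0]], B returns [[1]]
import Mathlib
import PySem

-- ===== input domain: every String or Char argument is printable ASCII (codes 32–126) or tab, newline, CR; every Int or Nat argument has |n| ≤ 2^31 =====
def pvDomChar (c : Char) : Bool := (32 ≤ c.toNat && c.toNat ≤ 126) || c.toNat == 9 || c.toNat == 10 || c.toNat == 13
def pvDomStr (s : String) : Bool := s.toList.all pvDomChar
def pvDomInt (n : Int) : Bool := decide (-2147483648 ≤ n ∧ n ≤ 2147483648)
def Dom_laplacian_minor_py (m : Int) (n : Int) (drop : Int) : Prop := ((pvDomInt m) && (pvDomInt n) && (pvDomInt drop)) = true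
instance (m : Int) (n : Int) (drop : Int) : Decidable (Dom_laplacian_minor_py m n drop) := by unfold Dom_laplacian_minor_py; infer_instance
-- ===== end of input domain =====

-- B replaces A's edge-by-edge +1/-1 accumulation into a zero matrix by a direct closed-form
-- computation of each minor entry (grid degree on the diagonal, -1 on grid-adjacent pairs, 0 else);
-- objective: alternative (same cost, different algorithm).


-- ===== PORT A =====
-- idx(u) of A
def pvIdxA (drop : Int) (u : Int) : Int := if u > drop then u - 1 else u

-- Python's `A[i][j] += d` on a list-of-lists, exact for the in-range (incl. negative) indices
-- that occur under Pre_ (Python raises IndexError outside, which Pre_ excludes).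
def pvMod2 (M : List (List Int)) (i j : Int) (d : Int) : List (List Int) :=
  let i' := if i < 0 then i + M.length else i
  M.modify i'.toNat (fun row =>
    let j' := if j < 0 then j + row.length else j
    row.modify j'.toNat (fun x => x + d))

-- add_edge of A, branch for branch
def pvAddEdge (drop : Int) (M : List (List Int)) (u : Int) (v : Int) : List (List Int) :=
  if u = drop ∧ v = drop then M
  else if u = drop then
    let vv := pvIdxA drop v
    pvMod2 M vv vv 1
  else if v = drop then
    let uu := pvIdxA drop u
    pvMod2 M uu uu 1
  else
    let uu := pvIdxA drop u
    let vv := pvIdxA drop v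
    pvMod2 (pvMod2 (pvMod2 (pvMod2 M uu uu 1) vv vv 1) uu vv (-1)) vv uu (-1)

def laplacian_minor_py (m : Int) (n : Int) (drop : Int) : List (List Int) :=
  let N := m * n
  if N ≤ 1 then []
  else
    let size := N - 1
    let A0 := List.replicate size.toNat (List.replicate size.toNat (0 : Int))
    (PySem.List.pyRange 0 m 1).foldl (fun A r =>
      (PySem.List.pyRange 0 n 1).foldl (fun A c =>
        let u := r * n + c
        let A1 := if r + 1 < m then pvAddEdge drop A u ((r + 1) * n + c) else A
        if c + 1 < n then pvAddEdge drop A1 u (r * n + (c + 1)) else A1) A) A0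

-- ===== PORT B =====
-- orig(i) of B: minor index back to original vertex index
def pvOrigB (drop : Int) (i : Int) : Int := if i < drop then i else i + 1

-- degree(r, c) of B: full grid degree from the coordinates
def pvDegB (m : Int) (n : Int) (r : Int) (c : Int) : Int :=
  (if 0 < r then 1 else 0) + (if r + 1 < m then 1 else 0) +
  (if 0 < c then 1 else 0) + (if c + 1 < n then 1 else 0)

def laplacian_minor_py_alt (m : Int) (n : Int) (drop : Int) : List (List Int) :=
  let N := m * n
  if N ≤ 1 then []
  else
    let size := N - 1
    (PySem.List.pyRange 0 size 1).map (fun i =>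
      let oi := pvOrigB drop i
      let ri := PySem.Int.floordiv oi n
      let ci := PySem.Int.mod oi n
      (PySem.List.pyRange 0 size 1).map (fun j =>
        let oj := pvOrigB drop j
        let rj := PySem.Int.floordiv oj n
        let cj := PySem.Int.mod oj n
        if i = j then pvDegB m n ri ci
        else if (ri - rj).natAbs + (ci - cj).natAbs = 1 then -1
        else 0))

-- ===== PRECONDITION & SPEC =====
-- Pre_ admits the trivial grids (m*n ≤ 1, where A returns []) and every grid with positive
-- dimensions whose `drop` names an actual vertex (0 ≤ drop < m*n).  It excludes: (a) positive
-- grids with drop ≥ m*n, on which A raises IndexError; (b) positive grids with drop < 0 and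
-- grids with both dimensions negative — there `drop` names no vertex (resp. the dimensions are
-- invalid), and A's returned matrix (a negative-index wraparound artefact, resp. the untouched
-- zero matrix left by empty loops) is an accidental value no caller would specify, as is any other.
def Pre_laplacian_minor_py (m : Int) (n : Int) (drop : Int) : Prop :=
  m * n ≤ 1 ∨ (1 ≤ m ∧ 1 ≤ n ∧ 0 ≤ drop ∧ drop < m * n)
instance (m : Int) (n : Int) (drop : Int) : Decidable (Pre_laplacian_minor_py m n drop) := by
  unfold Pre_laplacian_minor_py; infer_instance

def pvWitness_laplacian_minor_py : Int × Int × Int := (2, 3, 2)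

def Spec_laplacian_minor_py (m : Int) (n : Int) (drop : Int) (out : List (List Int)) : Prop :=
  out = laplacian_minor_py_alt m n drop
instance (m : Int) (n : Int) (drop : Int) (out : List (List Int)) : Decidable (Spec_laplacian_minor_py m n drop out) := by
  unfold Spec_laplacian_minor_py; infer_instance

-- ===== CLAIM (what is proved, stated in full; the proofs are below) =====
def Claim_equal_laplacian_minor_py : Prop := ∀ (m : Int) (n : Int) (drop : Int), Dom_laplacian_minor_py m n drop → Pre_laplacian_minor_py m n drop → Spec_laplacian_minor_py m n drop (laplacian_minor_py m n drop)

-- ===== LEMMAS AND PROOFS =====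

-- matrix entry (Nat indices, default 0) and well-formedness (s×s shape)
def pvGet2 (M : List (List Int)) (i j : Nat) : Int := (M.getD i []).getD j 0

def pvWF (s : Nat) (M : List (List Int)) : Prop := M.length = s ∧ ∀ r ∈ M, r.length = s

-- the entry change a single add_edge makes at (i, j)
def pvInd (a b i j : Nat) : Int := if i = a ∧ j = b then 1 else 0

def pvDelta (drop : Int) (u : Int) (v : Int) (i j : Nat) : Int :=
  if u = drop ∧ v = drop then 0
  else if u = drop then pvInd (pvIdxA drop v).toNat (pvIdxA drop v).toNat i j
  else if v = drop then pvInd (pvIdxA drop u).toNat (pvIdxA drop u).toNat i j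
  else pvInd (pvIdxA drop u).toNat (pvIdxA drop u).toNat i j
     + pvInd (pvIdxA drop v).toNat (pvIdxA drop v).toNat i j
     - pvInd (pvIdxA drop u).toNat (pvIdxA drop v).toNat i j
     - pvInd (pvIdxA drop v).toNat (pvIdxA drop u).toNat i j

theorem pvMod2_spec (s : Nat) (M : List (List Int)) (a b : Int) (d : Int)
    (hM : pvWF s M) (ha : 0 ≤ a) (ha' : a < (s : Int)) (hb : 0 ≤ b) (hb' : b < (s : Int)) :
    pvWF s (pvMod2 M a b d) ∧
      ∀ i j, pvGet2 (pvMod2 M a b d) i j =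
        pvGet2 M i j + (if i = a.toNat ∧ j = b.toNat then d else 0) := by
  obtain ⟨hlen, hrows⟩ := hM
  have ha0 : ¬ a < 0 := by omega
  have hb0 : ¬ b < 0 := by omega
  have hka : a.toNat < M.length := by omega
  refine ⟨⟨?_, ?_⟩, ?_⟩
  · simp [pvMod2, List.length_modify, hlen]
  · intro r hr
    simp only [pvMod2, if_neg ha0] at hr
    rw [List.mem_iff_getElem?] at hr
    obtain ⟨t, ht⟩ := hr
    rw [List.getElem?_modify] at ht
    cases hMt : M[t]? with
    | none => rw [hMt] at ht; simp at ht
    | some row =>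
      rw [hMt] at ht
      simp only [Option.map_eq_map, Option.map_some] at ht
      have hrl : row.length = s := hrows row (List.mem_of_getElem? hMt)
      by_cases hkt : a.toNat = t
      · rw [if_pos hkt] at ht
        injection ht with ht
        rw [← ht]
        simp [List.length_modify, hrl]
      · rw [if_neg hkt] at ht
        injection ht with ht
        rw [← ht]; exact hrl
  · intro i j
    simp only [pvMod2, if_neg ha0]
    unfold pvGet2
    rw [List.getD_eq_getElem?_getD, List.getD_eq_getElem?_getD, List.getElem?_modify]
    by_cases hik : a.toNat = i
    · subst hik
      rw [List.getElem?_eq_getElem hka]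
      have hrl : (M[a.toNat]).length = s := hrows _ (List.getElem_mem hka)
      simp only [Option.map_eq_map, Option.map_some, Option.getD_some, if_neg hb0, true_and]
      simp only [if_true]
      simp only [List.getD_eq_getElem?_getD, List.getElem?_eq_getElem hka, Option.getD_some]
      rw [List.getElem?_modify]
      by_cases hjb : b.toNat = j
      · subst hjb
        have hjlt : b.toNat < (M[a.toNat]).length := by omega
        rw [List.getElem?_eq_getElem hjlt]
        simp
      · have hne : ¬ j = b.toNat := fun h => hjb h.symm
        simp only [if_neg hjb, if_neg hne, Option.map_eq_map]
        cases hMj : (M[a.toNat])[j]? <;> simp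
    · have hne : ¬ (i = a.toNat ∧ j = b.toNat) := by rintro ⟨h1, -⟩; exact hik h1.symm
      rw [if_neg hne, List.getD_eq_getElem?_getD]
      simp [if_neg hik]

theorem pvAddEdge_spec (s : Nat) (m n drop : Int) (M : List (List Int)) (u v : Int)
    (hs : (s : Int) = m * n - 1) (hd : 0 ≤ drop) (hd' : drop < m * n)
    (hM : pvWF s M)
    (hu : 0 ≤ u) (hu' : u < m * n) (hv : 0 ≤ v) (hv' : v < m * n) (huv : u ≠ v) :
    pvWF s (pvAddEdge drop M u v) ∧
      ∀ i j, pvGet2 (pvAddEdge drop M u v) i j = pvGet2 M i j + pvDelta drop u v i j := by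
  have hidx : ∀ w : Int, 0 ≤ w → w < m * n → w ≠ drop →
      0 ≤ pvIdxA drop w ∧ pvIdxA drop w < (s : Int) := by
    intro w h1 h2 h3; unfold pvIdxA; split_ifs <;> omega
  simp only [pvAddEdge, pvDelta]
  by_cases h1 : u = drop ∧ v = drop
  · exact absurd (h1.1.trans h1.2.symm) huv
  · simp only [if_neg h1]
    by_cases h2 : u = drop
    · simp only [if_pos h2]
      have hvne : v ≠ drop := fun h => h1 ⟨h2, h⟩
      obtain ⟨hv1, hv2⟩ := hidx v hv hv' hvne
      obtain ⟨hwf, hent⟩ := pvMod2_spec s M (pvIdxA drop v) (pvIdxA drop v) 1 hM hv1 hv2 hv1 hv2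
      exact ⟨hwf, fun i j => by rw [hent i j]; unfold pvInd; rfl⟩
    · simp only [if_neg h2]
      by_cases h3 : v = drop
      · simp only [if_pos h3]
        obtain ⟨hu1, hu2⟩ := hidx u hu hu' h2
        obtain ⟨hwf, hent⟩ := pvMod2_spec s M (pvIdxA drop u) (pvIdxA drop u) 1 hM hu1 hu2 hu1 hu2
        exact ⟨hwf, fun i j => by rw [hent i j]; unfold pvInd; rfl⟩
      · simp only [if_neg h3]
        obtain ⟨hu1, hu2⟩ := hidx u hu hu' h2
        obtain ⟨hv1, hv2⟩ := hidx v hv hv' h3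
        obtain ⟨w1, e1⟩ := pvMod2_spec s M (pvIdxA drop u) (pvIdxA drop u) 1 hM hu1 hu2 hu1 hu2
        obtain ⟨w2, e2⟩ := pvMod2_spec s _ (pvIdxA drop v) (pvIdxA drop v) 1 w1 hv1 hv2 hv1 hv2
        obtain ⟨w3, e3⟩ := pvMod2_spec s _ (pvIdxA drop u) (pvIdxA drop v) (-1) w2 hu1 hu2 hv1 hv2
        obtain ⟨w4, e4⟩ := pvMod2_spec s _ (pvIdxA drop v) (pvIdxA drop u) (-1) w3 hv1 hv2 hu1 hu2
        refine ⟨w4, fun i j => ?_⟩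
        rw [e4, e3, e2, e1]
        unfold pvInd
        split_ifs <;> ring

-- generic: a fold whose step adds g x to entry (i,j) and preserves P
theorem pvFoldl_entry {α : Type} (i j : Nat) (g : α → Int)
    (P : List (List Int) → Prop) (step : List (List Int) → α → List (List Int))
    (L : List α) (M : List (List Int))
    (hstep : ∀ M x, x ∈ L → P M → P (step M x) ∧ pvGet2 (step M x) i j = pvGet2 M i j + g x)
    (hM : P M) :
    P (L.foldl step M) ∧
      pvGet2 (L.foldl step M) i j = pvGet2 M i j + (L.map g).sum := by
  induction L generalizing M with
  | nil => simpa using hM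
  | cons x L ih =>
    obtain ⟨h1, h2⟩ := hstep M x (by simp) hM
    obtain ⟨h3, h4⟩ := ih _ (fun M' y hy hPM' => hstep M' y (List.mem_cons_of_mem _ hy) hPM') h1
    exact ⟨h3, by simp [List.foldl_cons, h4, h2]; ring⟩

-- a sum over a nodup list of a function supported at one point
theorem pvSum_ite_of_nodup (L : List Int) (x : Int) (f : Int → Int) (h : L.Nodup) :
    (L.map (fun t => if t = x then f t else 0)).sum = if x ∈ L then f x else 0 := by
  induction L with
  | nil => simp
  | cons a L ih =>
    rcases List.nodup_cons.mp h with ⟨ha, hL⟩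
    by_cases hax : a = x
    · subst hax
      simp [List.mem_cons, ha, ih hL]
    · simp only [List.map_cons, List.sum_cons, if_neg hax, ih hL, List.mem_cons]
      by_cases hx : x ∈ L <;> simp [hx, Ne.symm hax]

theorem pvSum_ite_pyRange (a b x : Int) (f : Int → Int) :
    ((PySem.List.pyRange a b 1).map (fun t => if t = x then f t else 0)).sum =
      if a ≤ x ∧ x < b then f x else 0 := by
  rw [pvSum_ite_of_nodup _ _ _ (PySem.List.nodup_pyRange_one a b)]
  by_cases h : a ≤ x ∧ x < b <;>
    simp [PySem.List.mem_pyRange_one, h]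

-- uniqueness of (row, col) decomposition
theorem pvDivmod_unique (n r c r' c' : Int) (hc : 0 ≤ c) (hc' : c < n) (hd : 0 ≤ c') (hd' : c' < n) :
    r * n + c = r' * n + c' ↔ r = r' ∧ c = c' := by
  constructor
  · intro h
    rcases lt_trichotomy r r' with hlt | heq | hgt
    · nlinarith
    · subst heq; constructor; rfl; nlinarith
    · nlinarith
  · rintro ⟨rfl, rfl⟩; rfl

-- floordiv/mod of an explicit decomposition
theorem pvDivmod_shift (n q c : Int) (hn : 0 < n) (h1 : 0 ≤ c) (h2 : c < n) :
    PySem.Int.floordiv (q * n + c) n = q ∧ PySem.Int.mod (q * n + c) n = c := by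
  have hq : PySem.Int.floordiv (q * n + c) n = q := by
    rw [PySem.Int.floordiv_eq_iff_of_pos hn]
    constructor <;> nlinarith
  refine ⟨hq, ?_⟩
  have := PySem.Int.floordiv_mul_add_mod (q * n + c) n
  rw [hq] at this
  linarith

-- the double sum over the grid cells
def pvS2 (m n : Int) (F : Int → Int → Int) : Int :=
  ((PySem.List.pyRange 0 m 1).map (fun r =>
    ((PySem.List.pyRange 0 n 1).map (fun c => F r c)).sum)).sum

theorem pvS2_congr (m n : Int) (F G : Int → Int → Int)
    (h : ∀ r c, 0 ≤ r → r < m → 0 ≤ c → c < n → F r c = G r c) :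
    pvS2 m n F = pvS2 m n G := by
  unfold pvS2
  congr 1
  apply List.map_congr_left
  intro r hr
  rcases PySem.List.mem_pyRange_one.mp hr with ⟨hr1, hr2⟩
  congr 1
  apply List.map_congr_left
  intro c hc
  rcases PySem.List.mem_pyRange_one.mp hc with ⟨hc1, hc2⟩
  exact h r c (by omega) (by omega) (by omega) (by omega)

theorem pvS2_add (m n : Int) (F G : Int → Int → Int) :
    pvS2 m n (fun r c => F r c + G r c) = pvS2 m n F + pvS2 m n G := by
  unfold pvS2
  rw [← PySem.List.sum_map_add_int]
  congr 1
  apply List.map_congr_left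
  intro r _
  exact PySem.List.sum_map_add_int _ _ _

-- a double sum supported on the single cell whose vertex index is o
theorem pvS2_collapse (m n o : Int) (hn : 0 < n) (f : Int → Int → Int) :
    pvS2 m n (fun r c => if r * n + c = o then f r c else 0) =
      if 0 ≤ o ∧ o < m * n then
        f (PySem.Int.floordiv o n) (PySem.Int.mod o n) else 0 := by
  unfold pvS2
  have hinner : ∀ r : Int,
      ((PySem.List.pyRange 0 n 1).map (fun c => if r * n + c = o then f r c else 0)).sum =
        if r = PySem.Int.floordiv o n then f r (o - r * n) else 0 := by
    intro r
    have : (fun c => if r * n + c = o then f r c else 0) =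
        (fun c => if c = o - r * n then f r c else 0) := by
      funext c
      exact if_congr (by constructor <;> intro h <;> linarith) rfl rfl
    rw [this, pvSum_ite_pyRange]
    apply if_congr _ rfl rfl
    rw [eq_comm (a := r), PySem.Int.floordiv_eq_iff_of_pos hn]
    constructor <;> intro h <;> constructor <;> nlinarith [h.1, h.2]
  rw [List.map_congr_left (fun r _ => hinner r)]
  rw [pvSum_ite_of_nodup _ _ _ (PySem.List.nodup_pyRange_one 0 m)]
  simp only [PySem.List.mem_pyRange_one]
  have hmod := PySem.Int.floordiv_mul_add_mod o n
  by_cases h : 0 ≤ o ∧ o < m * n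
  · rw [if_pos ⟨(PySem.Int.le_floordiv_iff_mul_le hn).mpr (by linarith [h.1]),
      (PySem.Int.floordiv_lt_iff_lt_mul hn).mpr h.2⟩]
    have hx : o - PySem.Int.floordiv o n * n = PySem.Int.mod o n := by linarith
    rw [hx, if_pos h]
  · rw [if_neg]
    · simp [h]
    · intro hc
      rcases hc with ⟨h1, h2⟩
      rw [PySem.Int.le_floordiv_iff_mul_le hn] at h1
      rw [PySem.Int.floordiv_lt_iff_lt_mul hn] at h2
      exact h ⟨by linarith, by linarith⟩

-- the zero matrix has zero entries
theorem pvGet2_replicate (k i j : Nat) :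
    pvGet2 (List.replicate k (List.replicate k (0 : Int))) i j = 0 := by
  simp only [pvGet2, List.getD_eq_getElem?_getD, List.getElem?_replicate]
  split_ifs <;> simp

-- the edge contribution A's inner loop body makes at a cell (r, c)
def pvGCell (m n drop : Int) (i j : Nat) (r c : Int) : Int :=
  (if r + 1 < m then pvDelta drop (r * n + c) ((r + 1) * n + c) i j else 0) +
  (if c + 1 < n then pvDelta drop (r * n + c) (r * n + (c + 1)) i j else 0)

theorem pvEntryA (m n drop : Int) (hm : 1 ≤ m) (hn : 1 ≤ n) (hd : 0 ≤ drop)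
    (hd' : drop < m * n) (hN : 1 < m * n) (i j : Nat) :
    pvWF (m * n - 1).toNat (laplacian_minor_py m n drop) ∧
      pvGet2 (laplacian_minor_py m n drop) i j = pvS2 m n (pvGCell m n drop i j) := by
  have hcond : ¬ m * n ≤ 1 := by omega
  have hs : (((m * n - 1).toNat : Nat) : Int) = m * n - 1 := by omega
  simp only [laplacian_minor_py, if_neg hcond]
  have hA0 : pvWF (m * n - 1).toNat
      (List.replicate (m * n - 1).toNat (List.replicate (m * n - 1).toNat (0 : Int))) := by
    constructor
    · simp
    · intro r hr
      rw [List.eq_of_mem_replicate hr]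
      simp
  have hcell : ∀ (r c : Int), 0 ≤ r → r < m → 0 ≤ c → c < n →
      ∀ M, pvWF (m * n - 1).toNat M →
      pvWF (m * n - 1).toNat
        ((fun A c => if c + 1 < n then
            pvAddEdge drop (if r + 1 < m then pvAddEdge drop A (r * n + c) ((r + 1) * n + c) else A)
              (r * n + c) (r * n + (c + 1))
          else if r + 1 < m then pvAddEdge drop A (r * n + c) ((r + 1) * n + c) else A) M c) ∧
      pvGet2 ((fun A c => if c + 1 < n then
            pvAddEdge drop (if r + 1 < m then pvAddEdge drop A (r * n + c) ((r + 1) * n + c) else A)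
              (r * n + c) (r * n + (c + 1))
          else if r + 1 < m then pvAddEdge drop A (r * n + c) ((r + 1) * n + c) else A) M c) i j =
        pvGet2 M i j + pvGCell m n drop i j r c := by
    intro r c hr0 hr1 hc0 hc1 M hM
    have hu0 : 0 ≤ r * n + c := by positivity
    have hu1 : r * n + c < m * n := by nlinarith
    unfold pvGCell
    by_cases hrv : r + 1 < m <;> by_cases hch : c + 1 < n
    · have hv1 : (r + 1) * n + c < m * n := by nlinarith
      have hne1 : r * n + c ≠ (r + 1) * n + c := by intro h; nlinarith
      have hh1 : r * n + (c + 1) < m * n := by nlinarith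
      have hne2 : r * n + c ≠ r * n + (c + 1) := by omega
      obtain ⟨w1, e1⟩ := pvAddEdge_spec _ m n drop M (r * n + c) ((r + 1) * n + c)
        hs hd hd' hM hu0 hu1 (by positivity) hv1 hne1
      obtain ⟨w2, e2⟩ := pvAddEdge_spec _ m n drop _ (r * n + c) (r * n + (c + 1))
        hs hd hd' w1 hu0 hu1 (by positivity) hh1 hne2
      refine ⟨by simpa [if_pos hrv, if_pos hch] using w2, ?_⟩
      simp only [if_pos hrv, if_pos hch]
      rw [e2, e1 i j]
      ring
    · have hv1 : (r + 1) * n + c < m * n := by nlinarith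
      have hne1 : r * n + c ≠ (r + 1) * n + c := by intro h; nlinarith
      obtain ⟨w1, e1⟩ := pvAddEdge_spec _ m n drop M (r * n + c) ((r + 1) * n + c)
        hs hd hd' hM hu0 hu1 (by positivity) hv1 hne1
      refine ⟨by simpa [if_pos hrv, if_neg hch] using w1, ?_⟩
      simp only [if_pos hrv, if_neg hch]
      rw [e1 i j]
      ring
    · have hh1 : r * n + (c + 1) < m * n := by nlinarith
      have hne2 : r * n + c ≠ r * n + (c + 1) := by omega
      obtain ⟨w1, e1⟩ := pvAddEdge_spec _ m n drop M (r * n + c) (r * n + (c + 1))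
        hs hd hd' hM hu0 hu1 (by positivity) hh1 hne2
      refine ⟨by simpa [if_neg hrv, if_pos hch] using w1, ?_⟩
      simp only [if_neg hrv, if_pos hch]
      rw [e1 i j]
      ring
    · refine ⟨by simpa [if_neg hrv, if_neg hch] using hM, ?_⟩
      simp only [if_neg hrv, if_neg hch]
      ring
  obtain ⟨hW, hE⟩ := pvFoldl_entry i j
    (g := fun r => ((PySem.List.pyRange 0 n 1).map (fun c => pvGCell m n drop i j r c)).sum)
    (P := pvWF (m * n - 1).toNat)
    (step := fun A r => (PySem.List.pyRange 0 n 1).foldl (fun A c =>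
        if c + 1 < n then
          pvAddEdge drop (if r + 1 < m then pvAddEdge drop A (r * n + c) ((r + 1) * n + c) else A)
            (r * n + c) (r * n + (c + 1))
        else if r + 1 < m then pvAddEdge drop A (r * n + c) ((r + 1) * n + c) else A) A)
    (L := PySem.List.pyRange 0 m 1)
    (M := List.replicate (m * n - 1).toNat (List.replicate (m * n - 1).toNat (0 : Int)))
    (fun M r hr hMwf => by
      rcases PySem.List.mem_pyRange_one.mp hr with ⟨hr0, hr1⟩
      exact pvFoldl_entry i j
        (g := fun c => pvGCell m n drop i j r c)
        (P := pvWF (m * n - 1).toNat)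
        (step := fun A c =>
          if c + 1 < n then
            pvAddEdge drop (if r + 1 < m then pvAddEdge drop A (r * n + c) ((r + 1) * n + c) else A)
              (r * n + c) (r * n + (c + 1))
          else if r + 1 < m then pvAddEdge drop A (r * n + c) ((r + 1) * n + c) else A)
        (L := PySem.List.pyRange 0 n 1) (M := M)
        (fun M' c hc hM' => by
          rcases PySem.List.mem_pyRange_one.mp hc with ⟨hc0, hc1⟩
          exact hcell r c hr0 hr1 hc0 hc1 M' hM')
        hMwf)
    hA0
  refine ⟨?_, ?_⟩
  · exact hW
  · rw [hE, pvGet2_replicate]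
    unfold pvS2
    ring

-- indexing a comprehension over range(0, b)
theorem pvGetD_map_pyRange0 {α : Type} (f : Int → α) (b : Int) (i : Nat) (d : α)
    (hib : (i : Int) < b) :
    ((PySem.List.pyRange 0 b 1).map f).getD i d = f (i : Int) := by
  rw [← PySem.List.pyGetD_natCast]
  exact PySem.List.pyGetD_map_pyRange_of_nonneg f b (i : Int) d (by positivity) hib

-- extraction of B's entry
theorem pvEntryB (m n drop : Int) (hN : 1 < m * n) (i j : Nat)
    (hi : (i : Int) < m * n - 1) (hj : (j : Int) < m * n - 1) :
    pvGet2 (laplacian_minor_py_alt m n drop) i j =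
      if i = j then
        pvDegB m n (PySem.Int.floordiv (pvOrigB drop i) n) (PySem.Int.mod (pvOrigB drop i) n)
      else if (PySem.Int.floordiv (pvOrigB drop i) n - PySem.Int.floordiv (pvOrigB drop j) n).natAbs +
              (PySem.Int.mod (pvOrigB drop i) n - PySem.Int.mod (pvOrigB drop j) n).natAbs = 1
        then -1 else 0 := by
  have hcond : ¬ m * n ≤ 1 := by omega
  simp only [laplacian_minor_py_alt, if_neg hcond]
  unfold pvGet2
  rw [pvGetD_map_pyRange0 _ _ i _ hi, pvGetD_map_pyRange0 _ _ j _ hj]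
  by_cases hij : i = j
  · subst hij
    simp
  · rw [if_neg (fun h => hij (by exact_mod_cast h)), if_neg hij]

-- minor index / original vertex correspondence
theorem pvKey (m n drop : Int) (hd : 0 ≤ drop) (hd' : drop < m * n) (i : Nat)
    (hi : (i : Int) < m * n - 1) (w : Int) (h1 : 0 ≤ w) (h2 : w < m * n) (h3 : w ≠ drop) :
    (i = (pvIdxA drop w).toNat) ↔ w = pvOrigB drop (i : Int) := by
  unfold pvIdxA pvOrigB; split_ifs <;> omega

theorem pvOrigB_facts (m n drop : Int) (hd : 0 ≤ drop) (hd' : drop < m * n) (i : Nat)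
    (hi : (i : Int) < m * n - 1) :
    0 ≤ pvOrigB drop (i : Int) ∧ pvOrigB drop (i : Int) < m * n ∧ pvOrigB drop (i : Int) ≠ drop := by
  unfold pvOrigB; split_ifs <;> omega

-- the edge contribution at a diagonal entry: one per incident endpoint
theorem pvDelta_diag (m n drop : Int) (hd : 0 ≤ drop) (hd' : drop < m * n) (i : Nat)
    (hi : (i : Int) < m * n - 1) (u v : Int) (hu : 0 ≤ u) (hu' : u < m * n)
    (hv : 0 ≤ v) (hv' : v < m * n) (huv : u ≠ v) :
    pvDelta drop u v i i =
      (if u = pvOrigB drop (i : Int) then 1 else 0) +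
      (if v = pvOrigB drop (i : Int) then 1 else 0) := by
  obtain ⟨ho1, ho2, ho3⟩ := pvOrigB_facts m n drop hd hd' i hi
  unfold pvDelta pvInd
  by_cases h1 : u = drop ∧ v = drop
  · exact absurd (h1.1.trans h1.2.symm) huv
  · rw [if_neg h1]
    by_cases h2 : u = drop
    · rw [if_pos h2]
      have hvne : v ≠ drop := fun h => h1 ⟨h2, h⟩
      simp only [and_self, pvKey m n drop hd hd' i hi v hv hv' hvne]
      split_ifs <;> omega
    · rw [if_neg h2]
      by_cases h3 : v = drop
      · rw [if_pos h3]
        simp only [and_self, pvKey m n drop hd hd' i hi u hu hu' h2]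
        split_ifs <;> omega
      · rw [if_neg h3]
        simp only [pvKey m n drop hd hd' i hi u hu hu' h2,
          pvKey m n drop hd hd' i hi v hv hv' h3, and_self]
        split_ifs <;> omega

-- the edge contribution at an off-diagonal entry: -1 per edge joining the two vertices
theorem pvDelta_off (m n drop : Int) (hd : 0 ≤ drop) (hd' : drop < m * n) (i j : Nat)
    (hi : (i : Int) < m * n - 1) (hj : (j : Int) < m * n - 1) (hij : i ≠ j)
    (u v : Int) (hu : 0 ≤ u) (hu' : u < m * n) (hv : 0 ≤ v) (hv' : v < m * n) (huv : u ≠ v) :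
    pvDelta drop u v i j =
      (if u = pvOrigB drop (i : Int) ∧ v = pvOrigB drop (j : Int) then -1 else 0) +
      (if u = pvOrigB drop (j : Int) ∧ v = pvOrigB drop (i : Int) then -1 else 0) := by
  obtain ⟨hoi1, hoi2, hoi3⟩ := pvOrigB_facts m n drop hd hd' i hi
  obtain ⟨hoj1, hoj2, hoj3⟩ := pvOrigB_facts m n drop hd hd' j hj
  have hoij : pvOrigB drop (i : Int) ≠ pvOrigB drop (j : Int) := by
    unfold pvOrigB; split_ifs <;> omega
  unfold pvDelta pvInd
  by_cases h1 : u = drop ∧ v = drop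
  · exact absurd (h1.1.trans h1.2.symm) huv
  · rw [if_neg h1]
    by_cases h2 : u = drop
    · rw [if_pos h2]
      have hvne : v ≠ drop := fun h => h1 ⟨h2, h⟩
      simp only [pvKey m n drop hd hd' i hi v hv hv' hvne,
        pvKey m n drop hd hd' j hj v hv hv' hvne]
      split_ifs <;> omega
    · rw [if_neg h2]
      by_cases h3 : v = drop
      · rw [if_pos h3]
        simp only [pvKey m n drop hd hd' i hi u hu hu' h2,
          pvKey m n drop hd hd' j hj u hu hu' h2]
        split_ifs <;> omega
      · rw [if_neg h3]
        simp only [pvKey m n drop hd hd' i hi u hu hu' h2,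
          pvKey m n drop hd hd' j hj u hu hu' h2,
          pvKey m n drop hd hd' i hi v hv hv' h3,
          pvKey m n drop hd hd' j hj v hv hv' h3]
        split_ifs <;> omega

-- total diagonal contribution = grid degree (coordinate form)
theorem pvT_diag (m n oi ri ci : Int) (hm : 1 ≤ m) (hn : 1 ≤ n)
    (hdec : oi = ri * n + ci) (hci0 : 0 ≤ ci) (hcin : ci < n) (hri0 : 0 ≤ ri) (hrim : ri < m) :
    pvS2 m n (fun r c =>
      ((if r * n + c = oi then (if r + 1 < m then 1 else 0) else 0) +
       (if r * n + c = oi - n then (if r + 1 < m then 1 else 0) else 0)) +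
      ((if r * n + c = oi then (if c + 1 < n then 1 else 0) else 0) +
       (if r * n + c = oi - 1 then (if c + 1 < n then 1 else 0) else 0))) = pvDegB m n ri ci := by
  have hnpos : (0 : Int) < n := by omega
  have hoi0 : 0 ≤ oi := by nlinarith
  have hoim : oi < m * n := by nlinarith
  rw [pvS2_add, pvS2_add, pvS2_add,
    pvS2_collapse m n oi hnpos, pvS2_collapse m n (oi - n) hnpos,
    pvS2_collapse m n oi hnpos, pvS2_collapse m n (oi - 1) hnpos]
  obtain ⟨hfd, hmd⟩ : PySem.Int.floordiv oi n = ri ∧ PySem.Int.mod oi n = ci := by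
    rw [hdec]; exact pvDivmod_shift n ri ci hnpos hci0 hcin
  have hT2 : (if 0 ≤ oi - n ∧ oi - n < m * n then
      (if PySem.Int.floordiv (oi - n) n + 1 < m then (1 : Int) else 0) else 0) =
      if 0 < ri then 1 else 0 := by
    by_cases h : 0 < ri
    · have e2 : oi - n = (ri - 1) * n + ci := by linear_combination hdec
      obtain ⟨hf, -⟩ := pvDivmod_shift n (ri - 1) ci hnpos hci0 hcin
      rw [e2, hf, if_pos (by constructor <;> nlinarith), if_pos (by omega), if_pos h]
    · rw [if_neg, if_neg h]
      rintro ⟨hcon, -⟩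
      nlinarith
  have hT4 : (if 0 ≤ oi - 1 ∧ oi - 1 < m * n then
      (if PySem.Int.mod (oi - 1) n + 1 < n then (1 : Int) else 0) else 0) =
      if 0 < ci then 1 else 0 := by
    by_cases h : 0 < ci
    · have e4 : oi - 1 = ri * n + (ci - 1) := by linear_combination hdec
      obtain ⟨-, hg⟩ := pvDivmod_shift n ri (ci - 1) hnpos (by omega) (by omega)
      rw [e4, hg, if_pos (by constructor <;> nlinarith), if_pos (by omega), if_pos h]
    · rw [if_neg h]
      by_cases hoi : 0 < oi
      · have hri1 : 1 ≤ ri := by nlinarith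
        have hc0 : ci = 0 := by omega
        have e4 : oi - 1 = (ri - 1) * n + (n - 1) := by linear_combination hdec + hc0
        obtain ⟨-, hg⟩ := pvDivmod_shift n (ri - 1) (n - 1) hnpos (by omega) (by omega)
        rw [e4, hg, if_pos (by constructor <;> nlinarith), if_neg (by omega)]
      · rw [if_neg (by omega)]
  rw [hT2, hT4]
  simp only [if_pos (⟨hoi0, hoim⟩ : 0 ≤ oi ∧ oi < m * n)]
  rw [hfd, hmd]
  unfold pvDegB
  ring

-- total off-diagonal contribution = -1 exactly on grid-adjacent pairs (coordinate form)
theorem pvT_off (m n oi ri ci oj rj cj : Int) (hm : 1 ≤ m) (hn : 1 ≤ n)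
    (hdeci : oi = ri * n + ci) (hci0 : 0 ≤ ci) (hcin : ci < n) (hri0 : 0 ≤ ri) (hrim : ri < m)
    (hdecj : oj = rj * n + cj) (hcj0 : 0 ≤ cj) (hcjn : cj < n) (hrj0 : 0 ≤ rj) (hrjm : rj < m) :
    pvS2 m n (fun r c =>
      ((if r * n + c = oi then (if r + 1 < m ∧ oj = oi + n then -1 else 0) else 0) +
       (if r * n + c = oj then (if r + 1 < m ∧ oi = oj + n then -1 else 0) else 0)) +
      ((if r * n + c = oi then (if c + 1 < n ∧ oj = oi + 1 then -1 else 0) else 0) +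
       (if r * n + c = oj then (if c + 1 < n ∧ oi = oj + 1 then -1 else 0) else 0))) =
      if (ri - rj).natAbs + (ci - cj).natAbs = 1 then -1 else 0 := by
  have hnpos : (0 : Int) < n := by omega
  have hoi0 : 0 ≤ oi := by nlinarith
  have hoim : oi < m * n := by nlinarith
  have hoj0 : 0 ≤ oj := by nlinarith
  have hojm : oj < m * n := by nlinarith
  rw [pvS2_add, pvS2_add, pvS2_add,
    pvS2_collapse m n oi hnpos, pvS2_collapse m n oj hnpos,
    pvS2_collapse m n oi hnpos, pvS2_collapse m n oj hnpos]
  obtain ⟨hfdi, hmdi⟩ : PySem.Int.floordiv oi n = ri ∧ PySem.Int.mod oi n = ci := by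
    rw [hdeci]; exact pvDivmod_shift n ri ci hnpos hci0 hcin
  obtain ⟨hfdj, hmdj⟩ : PySem.Int.floordiv oj n = rj ∧ PySem.Int.mod oj n = cj := by
    rw [hdecj]; exact pvDivmod_shift n rj cj hnpos hcj0 hcjn
  simp only [if_pos (⟨hoi0, hoim⟩ : 0 ≤ oi ∧ oi < m * n),
    if_pos (⟨hoj0, hojm⟩ : 0 ≤ oj ∧ oj < m * n)]
  rw [hfdi, hmdi, hfdj, hmdj]
  have c1 : (ri + 1 < m ∧ oj = oi + n) ↔ (rj = ri + 1 ∧ cj = ci) := by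
    constructor
    · rintro ⟨h, he⟩
      exact (pvDivmod_unique n rj cj (ri + 1) ci hcj0 hcjn hci0 hcin).mp
        (by linear_combination he + hdeci - hdecj)
    · rintro ⟨h1, h2⟩
      exact ⟨by omega, by rw [hdeci, hdecj, h1, h2]; ring⟩
  have c2 : (rj + 1 < m ∧ oi = oj + n) ↔ (ri = rj + 1 ∧ ci = cj) := by
    constructor
    · rintro ⟨h, he⟩
      exact (pvDivmod_unique n ri ci (rj + 1) cj hci0 hcin hcj0 hcjn).mp
        (by linear_combination he + hdecj - hdeci)
    · rintro ⟨h1, h2⟩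
      exact ⟨by omega, by rw [hdeci, hdecj, h1, h2]; ring⟩
  have c3 : (ci + 1 < n ∧ oj = oi + 1) ↔ (rj = ri ∧ cj = ci + 1) := by
    constructor
    · rintro ⟨h, he⟩
      exact (pvDivmod_unique n rj cj ri (ci + 1) hcj0 hcjn (by omega) (by omega)).mp
        (by linear_combination he + hdeci - hdecj)
    · rintro ⟨h1, h2⟩
      exact ⟨by omega, by rw [hdeci, hdecj, h1, h2]; ring⟩
  have c4 : (cj + 1 < n ∧ oi = oj + 1) ↔ (ri = rj ∧ ci = cj + 1) := by
    constructor
    · rintro ⟨h, he⟩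
      exact (pvDivmod_unique n ri ci rj (cj + 1) hci0 hcin (by omega) (by omega)).mp
        (by linear_combination he + hdecj - hdeci)
    · rintro ⟨h1, h2⟩
      exact ⟨by omega, by rw [hdeci, hdecj, h1, h2]; ring⟩
  rw [if_congr c1 rfl rfl, if_congr c2 rfl rfl, if_congr c3 rfl rfl, if_congr c4 rfl rfl]
  split_ifs <;> omega

theorem pvGet2_eq_getElem (M : List (List Int)) (i j : Nat) (h1 : i < M.length)
    (h2 : j < (M[i]).length) : M[i][j] = pvGet2 M i j := by
  unfold pvGet2
  have hrow : M.getD i [] = M[i] := by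
    rw [List.getD_eq_getElem?_getD, List.getElem?_eq_getElem h1, Option.getD_some]
  rw [hrow, List.getD_eq_getElem?_getD, List.getElem?_eq_getElem h2, Option.getD_some]

theorem pvTotal_diag (m n drop : Int) (hm : 1 ≤ m) (hn : 1 ≤ n) (hd : 0 ≤ drop)
    (hd' : drop < m * n) (i : Nat) (hi : (i : Int) < m * n - 1) :
    pvS2 m n (pvGCell m n drop i i) =
      pvDegB m n (PySem.Int.floordiv (pvOrigB drop (i : Int)) n)
        (PySem.Int.mod (pvOrigB drop (i : Int)) n) := by
  obtain ⟨ho1, ho2, ho3⟩ := pvOrigB_facts m n drop hd hd' i hi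
  have hnpos : (0 : Int) < n := by omega
  have hdec : pvOrigB drop (i : Int) =
      PySem.Int.floordiv (pvOrigB drop (i : Int)) n * n +
        PySem.Int.mod (pvOrigB drop (i : Int)) n :=
    (PySem.Int.floordiv_mul_add_mod _ _).symm
  have hci0 := PySem.Int.mod_nonneg (pvOrigB drop (i : Int)) hnpos
  have hcin := PySem.Int.mod_lt (pvOrigB drop (i : Int)) hnpos
  have hri0 : 0 ≤ PySem.Int.floordiv (pvOrigB drop (i : Int)) n :=
    (PySem.Int.le_floordiv_iff_mul_le hnpos).mpr (by linarith)
  have hrim : PySem.Int.floordiv (pvOrigB drop (i : Int)) n < m :=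
    (PySem.Int.floordiv_lt_iff_lt_mul hnpos).mpr (by omega)
  refine (pvS2_congr m n _ _ ?_).trans
    (pvT_diag m n (pvOrigB drop (i : Int)) _ _ hm hn hdec hci0 hcin hri0 hrim)
  intro r c h0r h1r h0c h1c
  unfold pvGCell
  have hu0 : 0 ≤ r * n + c := by nlinarith
  have hu1 : r * n + c < m * n := by nlinarith
  have e1 : (r + 1) * n + c = r * n + c + n := by ring
  have e2 : r * n + (c + 1) = r * n + c + 1 := by ring
  rw [e1, e2]
  by_cases hrv : r + 1 < m <;> by_cases hch : c + 1 < n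
  · rw [if_pos hrv, if_pos hch,
      pvDelta_diag m n drop hd hd' i hi _ _ hu0 hu1 (by nlinarith) (by nlinarith)
        (by intro hcon; linarith),
      pvDelta_diag m n drop hd hd' i hi _ _ hu0 hu1 (by nlinarith) (by nlinarith)
        (by intro hcon; linarith)]
    simp only [if_pos hrv, if_pos hch]
    generalize r * n + c = u
    split_ifs <;> omega
  · rw [if_pos hrv, if_neg hch,
      pvDelta_diag m n drop hd hd' i hi _ _ hu0 hu1 (by nlinarith) (by nlinarith)
        (by intro hcon; linarith)]
    simp only [if_pos hrv, if_neg hch]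
    generalize r * n + c = u
    split_ifs <;> omega
  · rw [if_neg hrv, if_pos hch,
      pvDelta_diag m n drop hd hd' i hi _ _ hu0 hu1 (by nlinarith) (by nlinarith)
        (by intro hcon; linarith)]
    simp only [if_neg hrv, if_pos hch]
    generalize r * n + c = u
    split_ifs <;> omega
  · simp only [if_neg hrv, if_neg hch]
    generalize r * n + c = u
    split_ifs <;> omega

set_option maxHeartbeats 1000000 in
theorem pvTotal_off (m n drop : Int) (hm : 1 ≤ m) (hn : 1 ≤ n) (hd : 0 ≤ drop)
    (hd' : drop < m * n) (i j : Nat) (hi : (i : Int) < m * n - 1) (hj : (j : Int) < m * n - 1)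
    (hij : i ≠ j) :
    pvS2 m n (pvGCell m n drop i j) =
      if (PySem.Int.floordiv (pvOrigB drop (i : Int)) n -
            PySem.Int.floordiv (pvOrigB drop (j : Int)) n).natAbs +
          (PySem.Int.mod (pvOrigB drop (i : Int)) n -
            PySem.Int.mod (pvOrigB drop (j : Int)) n).natAbs = 1
        then -1 else 0 := by
  obtain ⟨hoi1, hoi2, hoi3⟩ := pvOrigB_facts m n drop hd hd' i hi
  obtain ⟨hoj1, hoj2, hoj3⟩ := pvOrigB_facts m n drop hd hd' j hj
  have hnpos : (0 : Int) < n := by omega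
  have hdeci : pvOrigB drop (i : Int) =
      PySem.Int.floordiv (pvOrigB drop (i : Int)) n * n +
        PySem.Int.mod (pvOrigB drop (i : Int)) n :=
    (PySem.Int.floordiv_mul_add_mod _ _).symm
  have hdecj : pvOrigB drop (j : Int) =
      PySem.Int.floordiv (pvOrigB drop (j : Int)) n * n +
        PySem.Int.mod (pvOrigB drop (j : Int)) n :=
    (PySem.Int.floordiv_mul_add_mod _ _).symm
  have hci0 := PySem.Int.mod_nonneg (pvOrigB drop (i : Int)) hnpos
  have hcin := PySem.Int.mod_lt (pvOrigB drop (i : Int)) hnpos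
  have hri0 : 0 ≤ PySem.Int.floordiv (pvOrigB drop (i : Int)) n :=
    (PySem.Int.le_floordiv_iff_mul_le hnpos).mpr (by linarith)
  have hrim : PySem.Int.floordiv (pvOrigB drop (i : Int)) n < m :=
    (PySem.Int.floordiv_lt_iff_lt_mul hnpos).mpr (by omega)
  have hcj0 := PySem.Int.mod_nonneg (pvOrigB drop (j : Int)) hnpos
  have hcjn := PySem.Int.mod_lt (pvOrigB drop (j : Int)) hnpos
  have hrj0 : 0 ≤ PySem.Int.floordiv (pvOrigB drop (j : Int)) n :=
    (PySem.Int.le_floordiv_iff_mul_le hnpos).mpr (by linarith)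
  have hrjm : PySem.Int.floordiv (pvOrigB drop (j : Int)) n < m :=
    (PySem.Int.floordiv_lt_iff_lt_mul hnpos).mpr (by omega)
  refine (pvS2_congr m n _ _ ?_).trans
    (pvT_off m n (pvOrigB drop (i : Int)) _ _ (pvOrigB drop (j : Int)) _ _ hm hn
      hdeci hci0 hcin hri0 hrim hdecj hcj0 hcjn hrj0 hrjm)
  intro r c h0r h1r h0c h1c
  unfold pvGCell
  have hu0 : 0 ≤ r * n + c := by nlinarith
  have hu1 : r * n + c < m * n := by nlinarith
  have e1 : (r + 1) * n + c = r * n + c + n := by ring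
  have e2 : r * n + (c + 1) = r * n + c + 1 := by ring
  rw [e1, e2]
  by_cases hrv : r + 1 < m <;> by_cases hch : c + 1 < n
  · rw [if_pos hrv, if_pos hch,
      pvDelta_off m n drop hd hd' i j hi hj hij _ _ hu0 hu1 (by nlinarith) (by nlinarith)
        (by intro hcon; linarith),
      pvDelta_off m n drop hd hd' i j hi hj hij _ _ hu0 hu1 (by nlinarith) (by nlinarith)
        (by intro hcon; linarith)]
    generalize r * n + c = u
    split_ifs <;> omega
  · rw [if_pos hrv, if_neg hch,
      pvDelta_off m n drop hd hd' i j hi hj hij _ _ hu0 hu1 (by nlinarith) (by nlinarith)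
        (by intro hcon; linarith)]
    generalize r * n + c = u
    split_ifs <;> omega
  · rw [if_neg hrv, if_pos hch,
      pvDelta_off m n drop hd hd' i j hi hj hij _ _ hu0 hu1 (by nlinarith) (by nlinarith)
        (by intro hcon; linarith)]
    generalize r * n + c = u
    split_ifs <;> omega
  · simp only [if_neg hrv, if_neg hch]
    generalize r * n + c = u
    split_ifs <;> omega

-- ===== VERDICT (by name: the statement is the Claim_ definition above) =====
theorem laplacian_minor_py_spec : Claim_equal_laplacian_minor_py := by
  unfold Claim_equal_laplacian_minor_py
  intro m n drop hDom hPre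
  unfold Spec_laplacian_minor_py
  by_cases hN : m * n ≤ 1
  · simp [laplacian_minor_py, laplacian_minor_py_alt, if_pos hN]
  · have hN' : 1 < m * n := by omega
    obtain ⟨hm, hn, hd, hd'⟩ : 1 ≤ m ∧ 1 ≤ n ∧ 0 ≤ drop ∧ drop < m * n := by
      rcases hPre with h | h
      · omega
      · exact h
    obtain ⟨hWF, -⟩ := pvEntryA m n drop hm hn hd hd' hN' 0 0
    have hlenB : (laplacian_minor_py_alt m n drop).length = (m * n - 1).toNat := by
      simp [laplacian_minor_py_alt, if_neg hN, PySem.List.length_pyRange_one]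
    have hrowB : ∀ (i : Nat) (h : i < (laplacian_minor_py_alt m n drop).length),
        ((laplacian_minor_py_alt m n drop)[i]).length = (m * n - 1).toNat := by
      intro i h
      simp [laplacian_minor_py_alt, if_neg hN, PySem.List.length_pyRange_one]
    apply List.ext_getElem
    · rw [hWF.1, hlenB]
    · intro i h1 h2
      apply List.ext_getElem
      · rw [hWF.2 _ (List.getElem_mem h1), hrowB i h2]
      · intro j hj1 hj2
        have hi : (i : Int) < m * n - 1 := by
          have := h1; rw [hWF.1] at this; omega
        have hj : (j : Int) < m * n - 1 := by
          have := hj1; rw [hWF.2 _ (List.getElem_mem h1)] at this; omega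
        rw [pvGet2_eq_getElem _ _ _ h1 hj1, pvGet2_eq_getElem _ _ _ h2 hj2,
          (pvEntryA m n drop hm hn hd hd' hN' i j).2, pvEntryB m n drop hN' i j hi hj]
        by_cases hij : i = j
        · subst hij
          rw [if_pos rfl, pvTotal_diag m n drop hm hn hd hd' i hi]
        · rw [if_neg hij, pvTotal_off m n drop hm hn hd hd' i j hi hj hij]
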